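-- pv_equiv track=rewrite | github.com/HBhswl/OJ-python | demo.py | deleteBlankLines
-- ===== SOURCE A (Python) =====
-- def deleteBlankLines(lines):
--     for i in range(len(lines), 0, -1):
--         line = lines[i - 1]
--         if line == "" or line == "\n":
--             continue
--         else:
--             return lines[:i]
--     return []
-- ===== SOURCE B (Python) =====
-- def deleteBlankLines(lines):
--     cut = 0
--     for i, line in enumerate(lines):
--         if line != "" and line != "\n":
--             cut = i + 1
--     return lines[:cut] if cut else []
-- ===== Notes on version B (the rewrite author's own statement) =====
-- stated objective: simpler
-- what changed: Replaces the backward early-returning index scan with a single forward enumerate pass that maintains the last non-blank boundary and slices once at the end.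
import Mathlib
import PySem

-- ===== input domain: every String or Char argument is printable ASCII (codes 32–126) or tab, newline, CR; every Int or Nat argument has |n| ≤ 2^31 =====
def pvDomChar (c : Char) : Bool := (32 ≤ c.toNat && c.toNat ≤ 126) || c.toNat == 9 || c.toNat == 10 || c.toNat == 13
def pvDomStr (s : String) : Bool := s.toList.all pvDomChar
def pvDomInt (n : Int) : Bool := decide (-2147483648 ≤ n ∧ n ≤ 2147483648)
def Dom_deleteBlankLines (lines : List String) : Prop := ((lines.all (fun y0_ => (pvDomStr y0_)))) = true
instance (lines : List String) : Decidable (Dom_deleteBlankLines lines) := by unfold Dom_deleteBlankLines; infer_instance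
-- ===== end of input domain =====

-- B replaces A's backward early-returning index scan by one forward pass that keeps the
-- last non-blank boundary and slices once at the end (objective: simpler).

-- ===== PORT A =====
-- the 'for i in range(len(lines), 0, -1)' loop with its early return, as structural
-- recursion over the pyRange index list
def pvALoop (lines : List String) : List Int → List String
  | [] => []
  | i :: rest =>
    match PySem.List.pyGet? lines (i - 1) with
    | none => []   -- IndexError: unreachable, i - 1 is always in range
    | some line =>
      if line = "" ∨ line = "\n" then pvALoop lines rest
      else PySem.List.slice lines none (some i)

def deleteBlankLines (lines : List String) : List String :=
  pvALoop lines (PySem.List.pyRange (lines.length : Int) 0 (-1))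

-- ===== PORT B =====
def deleteBlankLines_alt (lines : List String) : List String :=
  let cut : Int := (PySem.List.enumerate lines 0).foldl
    (fun cut p => if p.2 ≠ "" ∧ p.2 ≠ "\n" then p.1 + 1 else cut) 0
  if cut ≠ 0 then PySem.List.slice lines none (some cut) else []

-- ===== PRECONDITION & SPEC =====
def Spec_deleteBlankLines (lines : List String) (out : List String) : Prop := out = deleteBlankLines_alt lines
instance (lines : List String) (out : List String) : Decidable (Spec_deleteBlankLines lines out) := by unfold Spec_deleteBlankLines; infer_instance

-- ===== CLAIM (what is proved, stated in full; the proofs are below) =====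
def Claim_equal_deleteBlankLines : Prop := ∀ (lines : List String), Dom_deleteBlankLines lines → Spec_deleteBlankLines lines (deleteBlankLines lines)

-- ===== LEMMAS AND PROOFS =====

def pvBlank (s : String) : Bool := s = "" || s = "\n"

-- the common value: lines with trailing blank lines removed
def pvRtrim (l : List String) : List String := (l.reverse.dropWhile pvBlank).reverse

lemma pvRtrim_append_blank (l : List String) (x : String) (hx : pvBlank x = true) :
    pvRtrim (l ++ [x]) = pvRtrim l := by
  simp [pvRtrim, hx]

lemma pvRtrim_append_nonblank (l : List String) (x : String) (hx : pvBlank x = false) :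
    pvRtrim (l ++ [x]) = l ++ [x] := by
  simp [pvRtrim, hx]

lemma pvRtrim_prefix (l : List String) :
    l.take (pvRtrim l).length = pvRtrim l := by
  have h : pvRtrim l ++ (l.reverse.takeWhile pvBlank).reverse = l := by
    rw [pvRtrim, ← List.reverse_append, List.takeWhile_append_dropWhile, List.reverse_reverse]
  have h2 : (pvRtrim l ++ (l.reverse.takeWhile pvBlank).reverse).take (pvRtrim l).length
      = pvRtrim l := List.take_left
  rw [h] at h2
  exact h2

lemma pvALoop_eq (lines : List String) (n : Nat) (hn : n ≤ lines.length) :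
    pvALoop lines (PySem.List.pyRange (n : Int) 0 (-1)) = pvRtrim (lines.take n) := by
  induction n with
  | zero => simp [PySem.List.pyRange_neg_one_eq_nil, pvALoop, pvRtrim]
  | succ m ih =>
    have hm : m < lines.length := hn
    rw [PySem.List.pyRange_neg_one_cons (by exact_mod_cast Nat.succ_pos m)]
    have harg : ((m + 1 : Nat) : Int) - 1 = (m : Int) := by push_cast; ring
    have hget : PySem.List.pyGet? lines ((m : Int)) = some lines[m] := by
      rw [PySem.List.pyGet?_natCast]
      simp [hm]
    have htake : lines.take (m + 1) = lines.take m ++ [lines[m]] := by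
      rw [List.take_add_one]
      simp [hm]
    rw [pvALoop, harg, hget]
    dsimp only
    by_cases hb : lines[m] = "" ∨ lines[m] = "\n"
    · rw [if_pos hb, ih (Nat.le_of_lt hm), htake,
        pvRtrim_append_blank _ _ (by simp [pvBlank]; tauto)]
    · rw [if_neg hb, htake, pvRtrim_append_nonblank _ _ (by simp only [pvBlank]; push Not at hb; simp [hb])]
      rw [PySem.List.slice_to_natCast]
      exact htake

lemma pvFoldB (l : List String) (s c : Int) :
    ((PySem.List.enumerate l s).foldl
      (fun cut p => if p.2 ≠ "" ∧ p.2 ≠ "\n" then p.1 + 1 else cut) c)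
    = if pvRtrim l = [] then c else s + (pvRtrim l).length := by
  induction l using List.reverseRecOn generalizing c with
  | nil => simp [pvRtrim]
  | append_singleton l x ih =>
    rw [PySem.List.enumerate_append, List.foldl_append]
    simp only [PySem.List.enumerate_cons, PySem.List.enumerate_nil, List.foldl_cons, List.foldl_nil]
    by_cases hb : pvBlank x = true
    · have hx : ¬ (x ≠ "" ∧ x ≠ "\n") := by simp [pvBlank] at hb; tauto
      rw [if_neg hx, ih, pvRtrim_append_blank _ _ hb]
    · have hb' : pvBlank x = false := by simpa using hb
      have hx : (x ≠ "" ∧ x ≠ "\n") := by simp [pvBlank] at hb'; tauto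
      rw [if_pos hx, pvRtrim_append_nonblank _ _ hb']
      have : (l ++ [x]) ≠ [] := by simp
      rw [if_neg this]
      simp
      ring

lemma pvMain (lines : List String) : deleteBlankLines lines = deleteBlankLines_alt lines := by
  unfold deleteBlankLines deleteBlankLines_alt
  rw [pvALoop_eq lines lines.length le_rfl, List.take_length, pvFoldB]
  by_cases h : pvRtrim lines = []
  · simp [h]
  · rw [if_neg h]
    have hlen : (0 : Int) + ((pvRtrim lines).length : Int) ≠ 0 := by
      have : 0 < (pvRtrim lines).length := List.length_pos_iff.mpr h
      omega
    rw [if_pos hlen]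
    have : (0 : Int) + ((pvRtrim lines).length : Int) = ((pvRtrim lines).length : Int) := by ring
    rw [this, PySem.List.slice_to_natCast, pvRtrim_prefix]

-- ===== VERDICT (by name: the statement is the Claim_ definition above) =====
theorem deleteBlankLines_spec : Claim_equal_deleteBlankLines := by
  intro lines _
  exact pvMain lines
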